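-- pv_equiv track=rewrite | github.com/felizvida/genomeforge | bio/crispr_design.py | _pam_match
-- ===== SOURCE A (Python) =====
-- def _pam_match(window: str, pam: str) -> bool:
--     if len(window) != len(pam):
--         return False
--     for a, b in zip(window, pam):
--         if b == "N":
--             continue
--         if a != b:
--             return False
--     return True
-- ===== SOURCE B (Python) =====
-- def _pam_match(window: str, pam: str) -> bool:
--     if len(window) != len(pam):
--         return False
--     masked = "".join("N" if p == "N" else w for w, p in zip(window, pam))
--     return masked == pam
-- ===== Notes on version B (the rewrite author's own statement) =====
-- stated objective: alternative
-- what changed: Replaces the early-exit pairwise scan with a build-then-compare approach: construct a masked copy of window (each position where pam has 'N' replaced by 'N') and test it for string equality with pam.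
import Mathlib
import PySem

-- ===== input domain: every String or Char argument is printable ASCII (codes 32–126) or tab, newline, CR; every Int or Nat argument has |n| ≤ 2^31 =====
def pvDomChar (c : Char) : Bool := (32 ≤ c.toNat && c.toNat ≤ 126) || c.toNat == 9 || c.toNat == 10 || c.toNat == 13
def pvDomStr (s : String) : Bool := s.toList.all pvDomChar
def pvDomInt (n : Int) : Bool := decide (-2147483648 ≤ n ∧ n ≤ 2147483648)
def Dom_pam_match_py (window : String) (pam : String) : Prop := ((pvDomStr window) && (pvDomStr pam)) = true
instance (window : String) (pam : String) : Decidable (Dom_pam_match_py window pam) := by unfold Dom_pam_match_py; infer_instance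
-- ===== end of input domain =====

-- B replaces A's early-exit pairwise scan by building a masked copy of window and one string comparison (objective: alternative).

-- ===== PORT A =====
-- early-exit scan over the zipped character pairs, as in A's for-loop
def pamMatchGo : List (Char × Char) → Bool
  | [] => true
  | (a, b) :: rest =>
    if b = 'N' then pamMatchGo rest
    else if a ≠ b then false
    else pamMatchGo rest

def pam_match_py (window : String) (pam : String) : Bool :=
  if window.toList.length ≠ pam.toList.length then false
  else pamMatchGo (window.toList.zip pam.toList)

-- ===== PORT B =====
def pam_match_py_alt (window : String) (pam : String) : Bool :=
  if window.toList.length ≠ pam.toList.length then false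
  else
    let masked := List.zipWith (fun w p => if p = 'N' then 'N' else w) window.toList pam.toList
    decide (masked = pam.toList)

-- ===== PRECONDITION & SPEC =====
def Spec_pam_match_py (window : String) (pam : String) (out : Bool) : Prop := out = pam_match_py_alt window pam
instance (window : String) (pam : String) (out : Bool) : Decidable (Spec_pam_match_py window pam out) := by unfold Spec_pam_match_py; infer_instance

-- ===== CLAIM (what is proved, stated in full; the proofs are below) =====
def Claim_equal_pam_match_py : Prop := ∀ (window : String) (pam : String), Dom_pam_match_py window pam → Spec_pam_match_py window pam (pam_match_py window pam)

-- ===== LEMMAS AND PROOFS =====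

theorem pamMatchGo_eq_masked : ∀ (l1 l2 : List Char), l1.length = l2.length →
    pamMatchGo (l1.zip l2) = decide ((List.zipWith (fun w p => if p = 'N' then 'N' else w) l1 l2) = l2)
  | [], [], _ => by simp [pamMatchGo]
  | [], _ :: _, h => by simp at h
  | _ :: _, [], h => by simp at h
  | a :: l1, b :: l2, h => by
    have ih := pamMatchGo_eq_masked l1 l2 (by simpa using h)
    simp only [List.zip_cons_cons, pamMatchGo, List.zipWith_cons_cons]
    by_cases hb : b = 'N'
    · subst hb; simp [ih]
    · by_cases hab : a = b
      · subst hab; simp [hb, ih]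
      · simp [hb, hab]

-- ===== VERDICT (by name: the statement is the Claim_ definition above) =====
theorem pam_match_py_spec : Claim_equal_pam_match_py := by
  intro window pam _
  unfold Spec_pam_match_py pam_match_py pam_match_py_alt
  by_cases h : window.toList.length = pam.toList.length
  · rw [if_neg (by simp [h]), if_neg (by simp [h])]
    exact pamMatchGo_eq_masked _ _ h
  · rw [if_pos h, if_pos h]
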